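-- pv_equiv track=rewrite | github.com/lenhelm/AdventOfCode | advent/year_2022/day_3/main.py | identify_badge
-- ===== SOURCE A (Python) =====
-- from collections import Counter
-- import string
--
-- PRIO = dict(zip(string.ascii_letters, list(range(1, 53))))
--
-- def identify_badge(lines):
--     """Identify group badges and calcuate prio score"""
--     groups = chunks(lines, 3)
--     score = 0
--     for group in groups:
--         cts = [Counter(x.strip('\n')) for x in group]
--         common = cts[0] & cts[1] & cts[2]
--         score += PRIO[list(common.keys())[0]]
--     return score
--
-- def chunks(lst, n):
--     """Yield successive n-sized chunks from lst."""
--     for i in range(0, len(lst), n):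
--         yield lst[i:i + n]
-- ===== SOURCE B (Python) =====
-- def identify_badge(lines):
--     """Identify group badges and calcuate prio score"""
--     it = iter(lines)
--     score = 0
--     for first in it:
--         a = first.strip('\n')
--         b = next(it).strip('\n')
--         c = next(it).strip('\n')
--         o = ord(next(ch for ch in a if ch in b and ch in c))
--         score += o - 96 if o >= 97 else o - 38
--     return score
-- ===== Notes on version B (the rewrite author's own statement) =====
-- stated objective: simpler
-- what changed: One pass over an iterator consuming three lines per group, finding the badge with next() over a membership scan and computing its priority arithmetically from ord(), instead of index-range chunk slices, three Counters with two Counter intersections and the PRIO dict lookup.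
import Mathlib
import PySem

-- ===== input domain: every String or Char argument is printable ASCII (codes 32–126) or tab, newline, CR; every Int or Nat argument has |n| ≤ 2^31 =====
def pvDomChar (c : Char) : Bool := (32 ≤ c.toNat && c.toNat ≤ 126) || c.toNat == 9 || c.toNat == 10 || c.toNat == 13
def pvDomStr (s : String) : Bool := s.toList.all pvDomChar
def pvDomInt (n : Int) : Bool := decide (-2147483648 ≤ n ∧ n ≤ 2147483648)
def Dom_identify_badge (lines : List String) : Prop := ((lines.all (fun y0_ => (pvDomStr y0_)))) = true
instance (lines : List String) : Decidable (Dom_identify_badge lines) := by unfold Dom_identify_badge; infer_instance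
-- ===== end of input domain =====

-- B replaces chunk slicing + per-group Counter building + two Counter intersections + the PRIO
-- dict by one iterator pass that consumes three lines at a time, finds the badge by a membership
-- scan and computes its priority arithmetically from the character code.


-- PRIO = dict(zip(string.ascii_letters, range(1, 53)))  (module constant of A)
def pvPRIO : PySem.Dict Char Int :=
  PySem.Dict.ofList ("abcdefghijklmnopqrstuvwxyzABCDEFGHIJKLMNOPQRSTUVWXYZ".toList.zip
    (PySem.List.pyRange 1 53))

-- ===== PORT A =====
-- chunks(lst, 3): successive 3-sized slices
def pvChunks3 (lines : List String) : List (List String) :=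
  (PySem.List.pyRange 0 (lines.length : Int) 3).map
    (fun i => PySem.List.slice lines (some i) (some (i + 3)))

-- Counter.__and__ : iterate self.items(), keep min counts that are positive
def pvCounterAnd (a b : PySem.Dict Char Int) : PySem.Dict Char Int :=
  a.items.foldl (fun r kv =>
    let oc := PySem.Dict.getD b kv.1 0
    let nc := if kv.2 < oc then kv.2 else oc
    if 0 < nc then r.insert kv.1 nc else r) PySem.Dict.empty

def identify_badge (lines : List String) : Int :=
  (pvChunks3 lines).foldl (fun score group =>
    let cts := group.map (fun x => PySem.Dict.counter (PySem.Chars.stripChars x.toList ['\n']))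
    let common := pvCounterAnd (pvCounterAnd (cts.getD 0 PySem.Dict.empty) (cts.getD 1 PySem.Dict.empty))
      (cts.getD 2 PySem.Dict.empty)
    score + PySem.Dict.getD pvPRIO (common.keys.getD 0 ' ') 0) 0

-- ===== PORT B =====
def pvStripN (s : String) : List Char := PySem.Chars.stripChars s.toList ['\n']

-- the 'for first in it' loop of Source B: consume three lines per round, accumulate the score
def pvGoB (score : Int) : List String → Int
  | first :: l1 :: l2 :: rest =>
    let a := pvStripN first
    let b := pvStripN l1
    let c := pvStripN l2
    let o : Int := ((a.find? (fun ch => b.contains ch && c.contains ch)).getD ' ').toNat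
    pvGoB (score + (if 97 ≤ o then o - 96 else o - 38)) rest
  | _ => score   -- empty iterator ends the loop (1 or 2 leftover lines: Python raises, outside Pre_)

def identify_badge_alt (lines : List String) : Int := pvGoB 0 lines

-- ===== PRECONDITION & SPEC =====
def pvLetters : List Char := "abcdefghijklmnopqrstuvwxyzABCDEFGHIJKLMNOPQRSTUVWXYZ".toList

-- first character of a's stripped line that occurs in both other stripped lines
def pvFirstCommon (a b c : String) : Option Char :=
  ((pvStripN a).filter (fun ch => (pvStripN b).contains ch && (pvStripN c).contains ch)).head?

-- Pre_ excludes exactly the inputs on which the Python A raises: a line count not divisible by 3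
-- (IndexError on a short last group), a group with no common character (IndexError on keys[0]),
-- and a common character that is not an ASCII letter (KeyError in PRIO).
def Pre_identify_badge (lines : List String) : Prop :=
  lines.length % 3 = 0 ∧
  ∀ i ∈ PySem.List.pyRange 0 (lines.length : Int) 3,
    (pvFirstCommon (lines.getD i.toNat "") (lines.getD (i.toNat + 1) "")
        (lines.getD (i.toNat + 2) "")).any (fun ch => pvLetters.contains ch) = true
instance (lines : List String) : Decidable (Pre_identify_badge lines) := by
  unfold Pre_identify_badge; infer_instance

def pvWitness_identify_badge : List String := ["a", "a", "a"]

def Spec_identify_badge (lines : List String) (out : Int) : Prop := out = identify_badge_alt lines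
instance (lines : List String) (out : Int) : Decidable (Spec_identify_badge lines out) := by
  unfold Spec_identify_badge; infer_instance

-- ===== CLAIM (what is proved, stated in full; the proofs are below) =====
def Claim_equal_identify_badge : Prop := ∀ (lines : List String), Dom_identify_badge lines → Pre_identify_badge lines → Spec_identify_badge lines (identify_badge lines)

-- ===== LEMMAS AND PROOFS =====

-- A's per-group summand, as a function of the group's start index
def pvGA (lines : List String) (i : Int) : Int :=
  let group := PySem.List.slice lines (some i) (some (i + 3))
  let cts := group.map (fun x => PySem.Dict.counter (PySem.Chars.stripChars x.toList ['\n']))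
  let common := pvCounterAnd (pvCounterAnd (cts.getD 0 PySem.Dict.empty) (cts.getD 1 PySem.Dict.empty))
    (cts.getD 2 PySem.Dict.empty)
  PySem.Dict.getD pvPRIO (common.keys.getD 0 ' ') 0

lemma A_eq_sum (l : List String) :
    identify_badge l = ((PySem.List.pyRange 0 (l.length : Int) 3).map (pvGA l)).sum := by
  unfold identify_badge pvChunks3
  rw [List.foldl_map]
  exact (PySem.List.foldl_add _ (pvGA l) 0).trans (by simp)

-- the min value Counter.__and__ stores for a key of `a` against dict `b`
def pvMin (b : PySem.Dict Char Int) (kv : Char × Int) : Int :=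
  if kv.2 < PySem.Dict.getD b kv.1 0 then kv.2 else PySem.Dict.getD b kv.1 0

lemma condInsert_items (b : PySem.Dict Char Int) :
    ∀ (l : List (Char × Int)) (d : PySem.Dict Char Int),
      (l.map Prod.fst).Nodup → d.keys.Nodup → (∀ kv ∈ l, d.contains kv.1 = false) →
      (l.foldl (fun r kv =>
          let oc := PySem.Dict.getD b kv.1 0
          let nc := if kv.2 < oc then kv.2 else oc
          if 0 < nc then r.insert kv.1 nc else r) d).items
        = d.items ++ (l.filter (fun kv => 0 < pvMin b kv)).map (fun kv => (kv.1, pvMin b kv)) := by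
  intro l
  induction l with
  | nil => intro d _ _ _; simp
  | cons kv rest ih =>
    intro d hnd hdk hfresh
    simp only [List.map_cons, List.nodup_cons] at hnd
    by_cases hpos : 0 < pvMin b kv
    · have hins : (d.insert kv.1 (pvMin b kv)).items = d.items ++ [(kv.1, pvMin b kv)] :=
        PySem.Dict.items_insert_of_not_contains d _ (hfresh kv (by simp))
      have hkeys : (d.insert kv.1 (pvMin b kv)).keys.Nodup :=
        PySem.Dict.nodup_keys_insert d _ _ hdk
      have hf2 : ∀ p ∈ rest, (d.insert kv.1 (pvMin b kv)).contains p.1 = false := by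
        intro p hp
        rw [PySem.Dict.contains_insert]
        have : p.1 ≠ kv.1 := by
          intro h; exact hnd.1 (h ▸ (List.mem_map_of_mem hp))
        simp [this, hfresh p (by simp [hp])]
      have := ih (d.insert kv.1 (pvMin b kv)) hnd.2 hkeys hf2
      simp only [List.foldl_cons]
      rw [show (let oc := PySem.Dict.getD b kv.1 0;
          let nc := if kv.2 < oc then kv.2 else oc;
          if 0 < nc then d.insert kv.1 nc else d) = d.insert kv.1 (pvMin b kv) by
        simp only [pvMin] at hpos ⊢; simp [hpos]]
      rw [this, hins, List.filter_cons]
      simp [hpos]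
    · simp only [List.foldl_cons]
      rw [show (let oc := PySem.Dict.getD b kv.1 0;
          let nc := if kv.2 < oc then kv.2 else oc;
          if 0 < nc then d.insert kv.1 nc else d) = d by
        simp only [pvMin] at hpos ⊢; simp [hpos]]
      rw [ih d hnd.2 hdk (fun p hp => hfresh p (by simp [hp])), List.filter_cons]
      simp [hpos]

lemma counterAnd_items (a b : PySem.Dict Char Int) (h : a.keys.Nodup) :
    (pvCounterAnd a b).items
      = (a.items.filter (fun kv => 0 < pvMin b kv)).map (fun kv => (kv.1, pvMin b kv)) := by
  unfold pvCounterAnd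
  rw [condInsert_items b a.items PySem.Dict.empty (by simpa [PySem.Dict.keys] using h)
    (by simp) (by simp)]
  simp [PySem.Dict.empty]

lemma head?_filter_add (Q : Char → Bool) :
    ∀ (s : List Char) (acc : PySem.Set Char),
      ((s.foldl PySem.Set.add acc).filter Q).head? = ((acc ++ s).filter Q).head? := by
  intro s
  induction s with
  | nil => intro acc; simp
  | cons x rest ih =>
    intro acc
    simp only [List.foldl_cons]
    rw [ih]
    unfold PySem.Set.add
    by_cases hc : acc.contains x = true
    · simp only [hc, if_pos]
      have hmem : x ∈ acc := by simpa using hc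
      by_cases hq : Q x = true
      · have hne : acc.filter Q ≠ [] := by
          intro h
          have : x ∈ acc.filter Q := List.mem_filter.mpr ⟨hmem, hq⟩
          simp [h] at this
        simp only [List.filter_append, List.filter_cons, hq, if_pos]
        rw [List.head?_append_of_ne_nil _ hne, List.head?_append_of_ne_nil _ hne]
      · simp only [List.filter_append, List.filter_cons]
        simp [hq]
    · simp only [hc]
      simp [List.filter_append, List.filter_cons]

lemma head?_filter_ofList (Q : Char → Bool) (s : List Char) :
    ((PySem.Set.ofList s).filter Q).head? = (s.filter Q).head? := by
  simpa [PySem.Set.ofList, PySem.Set.empty] using head?_filter_add Q s PySem.Set.empty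

lemma keys_head (s0 s1 s2 : List Char) :
    (pvCounterAnd (pvCounterAnd (PySem.Dict.counter s0) (PySem.Dict.counter s1))
        (PySem.Dict.counter s2)).keys.head?
      = (s0.filter (fun c => s1.contains c && s2.contains c)).head? := by
  have h01 := counterAnd_items (PySem.Dict.counter s0) (PySem.Dict.counter s1)
    (PySem.Dict.nodup_keys_counter s0)
  have hk01 : (pvCounterAnd (PySem.Dict.counter s0) (PySem.Dict.counter s1)).keys.Nodup := by
    simp only [PySem.Dict.keys, h01, PySem.Dict.items_counter, List.filter_map, List.map_map]
    simp only [Function.comp_def]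
    simpa using ((PySem.Set.nodup_ofList s0).filter _)
  have h012 := counterAnd_items _ (PySem.Dict.counter s2) hk01
  simp only [PySem.Dict.keys, h012, h01, PySem.Dict.items_counter, List.filter_map,
    List.map_map, Function.comp_def, PySem.Dict.getD_counter, pvMin]
  rw [List.map_id', List.filter_filter, head?_filter_ofList]
  congr 1
  apply List.filter_congr
  intro c hc
  have h0 : 0 < s0.count c := List.count_pos_iff.mpr hc
  have h1 : s1.contains c = decide (0 < s1.count c) := by simp [List.count_pos_iff]
  have h2 : s2.contains c = decide (0 < s2.count c) := by simp [List.count_pos_iff]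
  rw [h1, h2]
  by_cases c1 : 0 < s1.count c <;> by_cases c2 : 0 < s2.count c <;>
    simp [c1, c2] <;> split_ifs <;> omega

-- range(0, m+3, 3) = 0 :: (range(0, m, 3) shifted by 3)
lemma pyRange3_cons (m : Nat) :
    PySem.List.pyRange 0 ((m : Int) + 3) 3
      = 0 :: (PySem.List.pyRange 0 (m : Int) 3).map (· + 3) := by
  rw [PySem.List.pyRange_of_pos 0 ((m : Int) + 3) (by norm_num),
    PySem.List.pyRange_of_pos 0 (m : Int) (by norm_num)]
  have hlt : (0 : Int) < (m : Int) + 3 := by positivity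
  rw [if_pos hlt]
  by_cases hm : (0 : Int) < (m : Int)
  · rw [if_pos hm]
    have hcnt : (((m : Int) + 3) - 0 + 3 - 1) / 3 = (((m : Int) - 0 + 3 - 1) / 3) + 1 := by omega
    have hcnt' : ((((m : Int) + 3) - 0 + 3 - 1) / 3).toNat
        = (((m : Int) - 0 + 3 - 1) / 3).toNat + 1 := by omega
    rw [hcnt', List.range_succ_eq_map]
    simp only [List.map_cons, List.map_map, Function.comp_def, Nat.cast_zero]
    refine List.cons_eq_cons.mpr ⟨by norm_num, ?_⟩
    apply List.map_congr_left
    intro k _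
    push_cast
    ring
  · rw [if_neg hm]
    have hm0 : m = 0 := by omega
    subst hm0
    norm_num

-- A's summand only looks at the slice, which shifts with the list
lemma pvGA_shift (a b c : String) (rest : List String) (i : Int) (hi : 0 ≤ i) :
    pvGA (a :: b :: c :: rest) (i + 3) = pvGA rest i := by
  unfold pvGA
  have hk : i = ((i.toNat : Nat) : Int) := by omega
  rw [hk, show ((i.toNat : Nat) : Int) + 3 = ((i.toNat + 3 : Nat) : Int) by push_cast; ring,
    show ((i.toNat + 3 : Nat) : Int) + 3 = ((i.toNat + 6 : Nat) : Int) by push_cast; ring,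
    PySem.List.slice_natCast, PySem.List.slice_natCast]
  have h1 : i.toNat + 6 - (i.toNat + 3) = 3 := by omega
  have h2 : i.toNat + 3 - i.toNat = 3 := by omega
  rw [h1, h2]
  simp

-- A's summand at index 0 for a group of three
lemma pvGA_zero (a b c : String) (rest : List String) :
    pvGA (a :: b :: c :: rest) 0
      = PySem.Dict.getD pvPRIO
          (((pvStripN a).filter
              (fun ch => (pvStripN b).contains ch && (pvStripN c).contains ch)).head?.getD ' ') 0 := by
  unfold pvGA
  rw [show (0 : Int) = ((0 : Nat) : Int) by rfl,
    show ((0 : Nat) : Int) + 3 = ((3 : Nat) : Int) by norm_num, PySem.List.slice_natCast]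
  simp only [Nat.sub_zero, List.drop_zero, List.take_succ_cons, List.take_zero]
  simp only [List.map_cons, List.map_nil, List.getD, List.getElem?_cons_zero,
    List.getElem?_cons_succ, Option.getD_some]
  rw [← List.head?_eq_getElem?, keys_head]
  rfl

-- peel one group off A
set_option maxRecDepth 4000 in
set_option maxHeartbeats 1000000 in
lemma A_cons (a b c : String) (rest : List String) :
    identify_badge (a :: b :: c :: rest)
      = pvGA (a :: b :: c :: rest) 0 + identify_badge rest := by
  rw [A_eq_sum, A_eq_sum]
  have hlen : (((a :: b :: c :: rest).length : Nat) : Int) = ((rest.length : Nat) : Int) + 3 := by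
    simp; ring
  rw [hlen, pyRange3_cons]
  rw [List.map_cons, List.sum_cons, List.map_map]
  have htail : ∀ i ∈ PySem.List.pyRange 0 ((rest.length : Nat) : Int) 3,
      (pvGA (a :: b :: c :: rest) ∘ (· + 3)) i = pvGA rest i := by
    intro i hi
    have h0 : 0 ≤ i := by
      rw [PySem.List.mem_pyRange_iff_of_pos (by norm_num)] at hi
      exact hi.1
    simp only [Function.comp_def]
    exact pvGA_shift a b c rest i h0
  rw [List.map_congr_left htail]

-- accumulator lemma for B's loop
lemma pvGoB_acc : ∀ (l : List String) (s : Int), pvGoB s l = s + pvGoB 0 l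
  | [], s => by simp [pvGoB]
  | [a], s => by simp [pvGoB]
  | [a, b], s => by simp [pvGoB]
  | a :: b :: c :: rest, s => by
    simp only [pvGoB]
    rw [pvGoB_acc rest, pvGoB_acc rest (0 + _)]
    ring

-- the PRIO table agrees with the ord() arithmetic on every letter
def pvArith (ch : Char) : Int :=
  if 97 ≤ ((ch.toNat : Nat) : Int) then ((ch.toNat : Nat) : Int) - 96
  else ((ch.toNat : Nat) : Int) - 38

set_option maxRecDepth 8000 in
lemma prio_all : pvLetters.all (fun ch => PySem.Dict.getD pvPRIO ch 0 == pvArith ch) = true := by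
  decide

lemma prio_arith (ch : Char) (h : ch ∈ pvLetters) :
    PySem.Dict.getD pvPRIO ch 0 = pvArith ch := by
  have := List.all_eq_true.mp prio_all ch h
  simpa using this

-- equal group values when the badge is a letter
lemma group_val_eq (a b c : String)
    (h : (pvFirstCommon a b c).any (fun ch => pvLetters.contains ch) = true) :
    PySem.Dict.getD pvPRIO
        (((pvStripN a).filter
            (fun ch => (pvStripN b).contains ch && (pvStripN c).contains ch)).head?.getD ' ') 0
      = (let o : Int := (((pvStripN a).find?
            (fun ch => (pvStripN b).contains ch && (pvStripN c).contains ch)).getD ' ').toNat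
         if 97 ≤ o then o - 96 else o - 38) := by
  unfold pvFirstCommon at h
  rw [← List.head?_filter]
  cases hfc : ((pvStripN a).filter
      (fun ch => (pvStripN b).contains ch && (pvStripN c).contains ch)).head? with
  | none => rw [hfc] at h; simp at h
  | some ch =>
    rw [hfc] at h
    simp only [Option.any_some] at h
    have hmem : ch ∈ pvLetters := by simpa using h
    simpa [pvArith] using prio_arith ch hmem

-- Pre_ transfers to the tail
lemma pre_tail (a b c : String) (rest : List String)
    (h : Pre_identify_badge (a :: b :: c :: rest)) : Pre_identify_badge rest := by
  obtain ⟨hlen, hgrp⟩ := h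
  constructor
  · simp at hlen; omega
  · intro i hi
    rw [PySem.List.mem_pyRange_iff_of_pos (by norm_num)] at hi
    obtain ⟨h0, hlt, hdvd⟩ := hi
    have hi' : i + 3 ∈ PySem.List.pyRange 0 (((a :: b :: c :: rest).length : Nat) : Int) 3 := by
      rw [PySem.List.mem_pyRange_iff_of_pos (by norm_num)]
      refine ⟨by omega, by simp; omega, by omega⟩
    have := hgrp (i + 3) hi'
    have ht : (i + 3).toNat = i.toNat + 3 := by omega
    rw [ht] at this
    simpa [List.getD] using this

-- the group condition at index 0
lemma pre_head (a b c : String) (rest : List String)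
    (h : Pre_identify_badge (a :: b :: c :: rest)) :
    (pvFirstCommon a b c).any (fun ch => pvLetters.contains ch) = true := by
  obtain ⟨_, hgrp⟩ := h
  have h0 : (0 : Int) ∈ PySem.List.pyRange 0 (((a :: b :: c :: rest).length : Nat) : Int) 3 := by
    rw [PySem.List.mem_pyRange_iff_of_pos (by norm_num)]
    refine ⟨le_refl _, by simp; positivity, by omega⟩
  simpa [List.getD] using hgrp 0 h0

lemma main_eq : ∀ (l : List String), Pre_identify_badge l →
    identify_badge l = identify_badge_alt l
  | [] => fun _ => by decide
  | [a] => fun h => absurd h.1 (by simp)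
  | [a, b] => fun h => absurd h.1 (by simp)
  | a :: b :: c :: rest => fun h => by
    rw [A_cons, pvGA_zero, main_eq rest (pre_tail a b c rest h),
      group_val_eq a b c (pre_head a b c rest h)]
    show _ = pvGoB 0 (a :: b :: c :: rest)
    simp only [pvGoB]
    rw [pvGoB_acc]
    simp only [identify_badge_alt]
    ring

-- ===== VERDICT (by name: the statement is the Claim_ definition above) =====
theorem identify_badge_spec : Claim_equal_identify_badge := by
  intro lines _ hpre
  exact main_eq lines hpre
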